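-- pv_equiv track=rewrite | github.com/titoTito21/Titan | help.py | parse_help_data
-- ===== SOURCE A (Python) =====
-- def parse_help_data(help_data):
--     """Parsuje dane pomocy do nagłówków i treści."""
--     headers = []
--     content_map = {}
--     current_header = None
--     content_lines = []
--
--     for line in help_data.splitlines():
--         if line.startswith("#"):
--             if current_header:
--                 content_map[current_header] = "\n".join(content_lines)
--             current_header = line[1:].strip()
--             headers.append(current_header)
--             content_lines = []
--         else:
--             content_lines.append(line)
--
--     if current_header:
--         content_map[current_header] = "\n".join(content_lines)
--
--     return headers, content_map
-- ===== SOURCE B (Python) =====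
-- def parse_help_data(help_data):
--     """Parsuje dane pomocy do nagłówków i treści."""
--     sections = []
--     for line in help_data.splitlines():
--         if line.startswith("#"):
--             sections.append((line[1:].strip(), []))
--         elif sections:
--             sections[-1][1].append(line)
--     headers = [h for h, _ in sections]
--     content_map = {h: "\n".join(ls) for h, ls in sections}
--     return headers, content_map
-- ===== Notes on version B (the rewrite author's own statement) =====
-- stated objective: simpler
-- what changed: One loop builds an ordered list of (header, lines) sections and headers/content_map are derived from it afterwards, removing the current_header sentinel, the None/truthiness guards and the duplicated post-loop flush.
-- intended difference: On inputs containing a header line whose text after the hash strips to empty, A's truthiness test on the current header never flushes that section, so the empty-string header appears in headers but its content is silently dropped from the map; B maps the empty-string header to its section content like any other header, which is the intended behaviour. — e.g. on parse_help_data("#"): A returns ([""], []), B returns ([""], [("", "")])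
import Mathlib
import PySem

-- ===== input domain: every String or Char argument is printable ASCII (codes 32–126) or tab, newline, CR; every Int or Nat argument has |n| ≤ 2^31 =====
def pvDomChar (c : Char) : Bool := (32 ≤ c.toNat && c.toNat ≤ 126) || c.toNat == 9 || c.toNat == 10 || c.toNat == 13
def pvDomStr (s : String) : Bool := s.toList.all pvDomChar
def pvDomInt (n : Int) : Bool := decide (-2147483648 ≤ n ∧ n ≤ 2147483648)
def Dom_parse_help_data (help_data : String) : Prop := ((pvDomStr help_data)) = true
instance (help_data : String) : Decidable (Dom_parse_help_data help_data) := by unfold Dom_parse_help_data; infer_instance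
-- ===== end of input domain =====

-- B replaces A's current_header sentinel / truthiness guards / duplicated flush by one ordered
-- list of (header, lines) sections from which headers and the map are derived (objective: simpler).
-- Intended difference (D_): on inputs with a header line whose text after the hash strips to
-- empty, A's truthiness test on the current header never flushes that section, so the empty-string
-- key is missing from its map; B keeps it like any other header, the intended behaviour.


-- ===== PORT A =====
-- Python truthiness flush: 'if current_header: content_map[current_header] = "\n".join(content_lines)'
-- (None and the empty string are both falsy, so an empty header is never flushed — as in A).
def pvFlushA (m : PySem.Dict String String) (cur : Option String) (cls : List String) :
    PySem.Dict String String :=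
  match cur with
  | none => m
  | some h => if h == "" then m else m.insert h (PySem.Str.join "\n" cls)

-- one iteration of A's for-loop; state = (headers, content_map, current_header, content_lines)
def pvStepA (st : List String × PySem.Dict String String × Option String × List String)
    (line : String) : List String × PySem.Dict String String × Option String × List String :=
  if PySem.Str.startswith line "#" then
    let h := PySem.Str.strip (PySem.Str.slice line (some 1) none)   -- line[1:].strip()
    (st.1 ++ [h], pvFlushA st.2.1 st.2.2.1 st.2.2.2, some h, ([] : List String))
  else
    (st.1, st.2.1, st.2.2.1, st.2.2.2 ++ [line])

def parse_help_data (help_data : String) : List String × (List (String × String)) :=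
  let st := (PySem.Str.splitlines help_data).foldl pvStepA ([], PySem.Dict.empty, none, [])
  (st.1, (pvFlushA st.2.1 st.2.2.1 st.2.2.2).items)

-- ===== PORT B =====
-- one iteration of B's loop over the ordered section list
def pvStepB (sections : List (String × List String)) (line : String) :
    List (String × List String) :=
  if PySem.Str.startswith line "#" then
    sections ++ [(PySem.Str.strip (PySem.Str.slice line (some 1) none), [])]
  else
    match sections.getLast? with
    | some last => sections.dropLast ++ [(last.1, last.2 ++ [line])]   -- sections[-1][1].append(line)
    | none => sections                                                 -- 'elif sections:' — skip

-- the dict comprehension {h: "\n".join(ls) for h, ls in sections}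
def pvDictB (sections : List (String × List String)) : PySem.Dict String String :=
  sections.foldl (fun d p => d.insert p.1 (PySem.Str.join "\n" p.2)) PySem.Dict.empty

def parse_help_data_alt (help_data : String) : List String × (List (String × String)) :=
  let sections := (PySem.Str.splitlines help_data).foldl pvStepB []
  (sections.map Prod.fst, (pvDictB sections).items)

-- ===== PRECONDITION & SPEC =====
-- On inputs with a header line stripping to empty, A drops that section's content from the map
-- (truthiness bug); B keeps it under the empty-string key — the intended value.
def D_parse_help_data (help_data : String) : Prop :=
  ∃ l ∈ PySem.Str.splitlines help_data,
    PySem.Str.startswith l "#" = true ∧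
    PySem.Str.strip (PySem.Str.slice l (some 1) none) = ""
instance (help_data : String) : Decidable (D_parse_help_data help_data) := by
  unfold D_parse_help_data; infer_instance

def Spec_parse_help_data (help_data : String) (out : List String × (List (String × String))) : Prop :=
  ¬ D_parse_help_data help_data → out = parse_help_data_alt help_data
instance (help_data : String) (out : List String × (List (String × String))) :
    Decidable (Spec_parse_help_data help_data out) := by unfold Spec_parse_help_data; infer_instance

def pvDiffWitness_parse_help_data : String := "#"
def pvDiffWitnessOut_parse_help_data :
    (List String × (List (String × String))) × (List String × (List (String × String))) :=
  (([""], []), ([""], [("", "")]))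

-- ===== CLAIM (what is proved, stated in full; the proofs are below) =====
def Claim_unchanged_parse_help_data : Prop := ∀ (help_data : String), Dom_parse_help_data help_data → Spec_parse_help_data help_data (parse_help_data help_data)
def Claim_changed_parse_help_data : Prop := Dom_parse_help_data (pvDiffWitness_parse_help_data) ∧ D_parse_help_data (pvDiffWitness_parse_help_data) ∧ parse_help_data (pvDiffWitness_parse_help_data) = pvDiffWitnessOut_parse_help_data.1 ∧ parse_help_data_alt (pvDiffWitness_parse_help_data) = pvDiffWitnessOut_parse_help_data.2 ∧ pvDiffWitnessOut_parse_help_data.1 ≠ pvDiffWitnessOut_parse_help_data.2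
def Claim_exact_parse_help_data : Prop := ∀ (help_data : String), Dom_parse_help_data help_data → D_parse_help_data help_data → parse_help_data help_data ≠ parse_help_data_alt help_data

-- ===== LEMMAS AND PROOFS =====

-- finishing step shared by the equivalence lemmas
def pvFinA (st : List String × PySem.Dict String String × Option String × List String) :
    List String × (List (String × String)) :=
  (st.1, (pvFlushA st.2.1 st.2.2.1 st.2.2.2).items)

def pvResB (S : List (String × List String)) : List String × (List (String × String)) :=
  (S.map Prod.fst, (pvDictB S).items)

lemma pvDictB_concat (T : List (String × List String)) (p : String × List String) :
    pvDictB (T ++ [p]) = (pvDictB T).insert p.1 (PySem.Str.join "\n" p.2) := by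
  simp [pvDictB, List.foldl_append]

-- the joint loop invariant: A's state corresponds to B's section list
lemma pv_loop_eq (lines : List String)
    (hD : ∀ l ∈ lines, PySem.Str.startswith l "#" = true →
          PySem.Str.strip (PySem.Str.slice l (some 1) none) ≠ "") :
    (∀ cl, pvFinA (lines.foldl pvStepA ([], PySem.Dict.empty, none, cl))
            = pvResB (lines.foldl pvStepB []))
    ∧ (∀ (T : List (String × List String)) (h : String) (cl : List String), h ≠ "" →
        pvFinA (lines.foldl pvStepA
            ((T ++ [(h, cl)]).map Prod.fst, pvDictB T, some h, cl))
          = pvResB (lines.foldl pvStepB (T ++ [(h, cl)]))) := by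
  induction lines with
  | nil =>
    constructor
    · intro cl
      simp [pvFinA, pvResB, pvFlushA, pvDictB]
    · intro T h cl hh
      simp only [List.foldl_nil, pvFinA, pvResB, pvFlushA]
      rw [pvDictB_concat]
      simp [hh]
  | cons l ls ih =>
    have hl := hD l (by simp)
    have hls : ∀ x ∈ ls, PySem.Str.startswith x "#" = true →
        PySem.Str.strip (PySem.Str.slice x (some 1) none) ≠ "" := by
      intro x hx; exact hD x (by simp [hx])
    obtain ⟨ih1, ih2⟩ := ih hls
    by_cases hs : PySem.Str.startswith l "#" = true
    · have hh' := hl hs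
      constructor
      · intro cl
        simp only [List.foldl_cons, pvStepA, pvStepB, hs, if_pos]
        have e1 : pvFlushA PySem.Dict.empty none cl = PySem.Dict.empty := rfl
        rw [e1]
        have := ih2 [] (PySem.Str.strip (PySem.Str.slice l (some 1) none)) [] hh'
        simpa [pvDictB] using this
      · intro T h cl hh
        simp only [List.foldl_cons, pvStepA, pvStepB, hs, if_pos]
        have e1 : pvFlushA (pvDictB T) (some h) cl
            = pvDictB (T ++ [(h, cl)]) := by
          rw [pvDictB_concat]
          simp [pvFlushA, hh]
        rw [e1]
        have := ih2 (T ++ [(h, cl)]) (PySem.Str.strip (PySem.Str.slice l (some 1) none)) [] hh'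
        simpa using this
    · constructor
      · intro cl
        simp only [List.foldl_cons, pvStepA, pvStepB, hs]
        simpa using ih1 (cl ++ [l])
      · intro T h cl hh
        simp only [List.foldl_cons, pvStepA, pvStepB, hs]
        rw [List.getLast?_concat, List.dropLast_concat]
        have := ih2 T h (cl ++ [l]) hh
        simpa using this

-- A never puts the empty-string key into its map
lemma pvFlushA_keys (m : PySem.Dict String String) (cur : Option String) (cls : List String)
    (hm : "" ∉ m.keys) : "" ∉ (pvFlushA m cur cls).keys := by
  cases cur with
  | none => exact hm
  | some h =>
    simp only [pvFlushA]
    by_cases hh : h == ""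
    · simpa [hh] using hm
    · simp only [hh, if_false, Bool.false_eq_true]
      rw [PySem.Dict.mem_keys_insert]
      rintro (rfl | hk)
      · simp at hh
      · exact hm hk

lemma pvLoopA_keys (lines : List String) :
    ∀ st : List String × PySem.Dict String String × Option String × List String,
      "" ∉ st.2.1.keys → "" ∉ (lines.foldl pvStepA st).2.1.keys := by
  induction lines with
  | nil => intro st h; exact h
  | cons l ls ih =>
    intro st h
    simp only [List.foldl_cons]
    apply ih
    by_cases hs : PySem.Str.startswith l "#" = true
    · simp only [pvStepA, hs, if_pos]
      exact pvFlushA_keys st.2.1 st.2.2.1 st.2.2.2 h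
    · simp only [pvStepA, hs, Bool.false_eq_true, if_false]
      exact h

-- B's section headers: the step appends the new header, keeps the rest
lemma pvStepB_fst (S : List (String × List String)) (l : String) :
    (pvStepB S l).map Prod.fst
      = if PySem.Str.startswith l "#" = true
        then S.map Prod.fst ++ [PySem.Str.strip (PySem.Str.slice l (some 1) none)]
        else S.map Prod.fst := by
  by_cases hs : PySem.Str.startswith l "#" = true
  · simp only [pvStepB, hs, if_pos]
    simp
  · simp only [pvStepB, hs, if_false, Bool.false_eq_true]
    rcases e : S.getLast? with _ | last
    · simp
    · obtain ⟨T, rfl⟩ := (List.getLast?_eq_some_iff).mp e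
      simp

lemma pvLoopB_fst_mono (lines : List String) :
    ∀ (S : List (String × List String)) (x : String),
      x ∈ S.map Prod.fst → x ∈ (lines.foldl pvStepB S).map Prod.fst := by
  induction lines with
  | nil => intro S x h; exact h
  | cons l ls ih =>
    intro S x h
    simp only [List.foldl_cons]
    apply ih
    rw [pvStepB_fst]
    split
    · exact List.mem_append_left _ h
    · exact h

lemma pvLoopB_fst_of_mem (lines : List String) :
    ∀ (S : List (String × List String)) (l : String), l ∈ lines →
      PySem.Str.startswith l "#" = true →
      PySem.Str.strip (PySem.Str.slice l (some 1) none) = "" →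
      "" ∈ (lines.foldl pvStepB S).map Prod.fst := by
  induction lines with
  | nil => intro S l h; simp at h
  | cons a ls ih =>
    intro S l hmem hs hstr
    simp only [List.foldl_cons]
    rcases List.mem_cons.mp hmem with rfl | hmem'
    · apply pvLoopB_fst_mono
      rw [pvStepB_fst, if_pos hs, hstr]
      simp
    · exact ih (pvStepB S a) l hmem' hs hstr

lemma pvDictB_keys (S : List (String × List String)) :
    (pvDictB S).keys = PySem.Set.ofList (S.map Prod.fst) := by
  unfold pvDictB
  rw [PySem.Dict.keys_foldl_insert_key S Prod.fst
      (fun d p => PySem.Str.join "\n" p.2) PySem.Dict.empty]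
  rfl

-- ===== VERDICT (by name: the statement is the Claim_ definition above) =====
theorem parse_help_data_spec : Claim_unchanged_parse_help_data := by
  intro hd _ hnd
  have hD : ∀ l ∈ PySem.Str.splitlines hd, PySem.Str.startswith l "#" = true →
      PySem.Str.strip (PySem.Str.slice l (some 1) none) ≠ "" := by
    intro l hl hs hstr
    exact hnd ⟨l, hl, hs, hstr⟩
  show parse_help_data hd = parse_help_data_alt hd
  exact (pv_loop_eq (PySem.Str.splitlines hd) hD).1 []

theorem parse_help_data_changed : Claim_changed_parse_help_data := by
  unfold Claim_changed_parse_help_data; decide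

theorem parse_help_data_tight : Claim_exact_parse_help_data := by
  intro hd _ hD heq
  obtain ⟨l, hl, hs, hstr⟩ := hD
  have hA : "" ∉ (parse_help_data hd).2.map Prod.fst := by
    have h0 : "" ∉ (PySem.Dict.empty : PySem.Dict String String).keys := by simp
    have h1 := pvLoopA_keys (PySem.Str.splitlines hd)
        ([], PySem.Dict.empty, none, []) h0
    have h2 := pvFlushA_keys
        ((PySem.Str.splitlines hd).foldl pvStepA ([], PySem.Dict.empty, none, [])).2.1
        ((PySem.Str.splitlines hd).foldl pvStepA ([], PySem.Dict.empty, none, [])).2.2.1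
        ((PySem.Str.splitlines hd).foldl pvStepA ([], PySem.Dict.empty, none, [])).2.2.2 h1
    simpa [parse_help_data, PySem.Dict.keys] using h2
  have hB : "" ∈ (parse_help_data_alt hd).2.map Prod.fst := by
    have h1 := pvLoopB_fst_of_mem (PySem.Str.splitlines hd) [] l hl hs hstr
    have h2 : "" ∈ (pvDictB ((PySem.Str.splitlines hd).foldl pvStepB [])).keys := by
      rw [pvDictB_keys]
      exact (PySem.Set.mem_ofList _ _).mpr h1
    simpa [parse_help_data_alt, PySem.Dict.keys] using h2
  rw [heq] at hA
  exact hA hB
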